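-- pv_equiv track=rewrite | github.com/mahdianyoones/persian-ney-csp-solver | solver/bb.py | __gen_items
-- ===== SOURCE A (Python) =====
-- def __gen_items(specs, capacity, values):
--     '''Generates all possible instruments and sorts them greedily!
--
--     Each item is a hypothetical instrument that may or may not be built.
--     To produce combinations like {Bb, Bb, C, C, G}, check their utility,
--     and satisfiability, we resort to combinaorial counting principles!
--
--     What is the maximum number of instruments constructable via the given
--     pieces?
--
--     We don't know.
--
--     If we could answer this questions precisely and accurately, then the
--     problem would be much easier to solver.
--
--     That is, the nature of pieces and constraints dictates this unknown
--     number.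
--
--     However, since we are not trying to answer this question, we relax
--     all the constraints except the length, which is predictable
--     and precise.
--
--     relaxed maximum number of viable instruments =
--         Sum(length of all pieces) / length of the instrument type
--
--     With the data set at hand, there are 1200 / 39 = 30 maximum instruments,
--     where 39 is the length of F_short and 1200 is the length sum of all pieces.
--
--     That is, if we relaxed all constraints, we could at most build 30
--     instruments of type F_short.
--
--     For Bb, there would be at most 1200 / 59 = 20 instruments.
--     For A, there would be at most 1200 / 59 = 19 instruments.
--     and so on
--
--     Now, the right question is 'how many of which instrument type would
--     yield the highest utility?
--
--     Again, since we don't know if, say, 20 instruments of type Bb is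
--     possible or not, we need to consider this combination as well as many
--     similar combinations.
--
--     Therefore, we generate 20 Bb items, 10 A items, and so on. The resulting
--     items would be:
--
--     Bb  consider / not cinsider
--     Bb  consider / not cinsider
--     Bb  consider / not cinsider
--
--     ... 16 similar items in between
--
--     Bb  consider / not cinsider
--
--     A  consider / not cinsider
--     A  consider / not cinsider
--     A  consider / not cinsider
--
--     ... 16 similar items in between
--
--     A  consider / not cinsider
--
--     and so on for other kooks.
--
--     This way BB algorithm can sequentially iterate over items and do its
--     job while not exluding any possibility.
--
--     This item generation approach gauarantees that THE BEST VIABLE COMBINATION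
--     is not missed.'''
--     all = {}
--     for reg, spec in specs.items():
--         count = int(capacity // spec['len'])
--         all[reg] = [reg for i in range(count, 0, -1)]
--     items = []
--     all_appended = False
--     # regs reverse sorted based on values
--     rvalregs = sorted(specs.keys(),
--         key=lambda reg: values[reg], reverse=True)
--     while not all_appended:
--         all_appended = True
--         for reg in rvalregs:
--             if len(all[reg]) > 0:
--                 items.append(all[reg].pop())
--                 if len(all[reg]):
--                     all_appended = False
--     return items
-- ===== SOURCE B (Python) =====
-- def __gen_items(specs, capacity, values):
--     '''Round-indexed generation: counts per region + bounded double loop,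
--     replacing the list-popping while/flag loop.'''
--     counts = {reg: int(capacity // spec['len']) for reg, spec in specs.items()}
--     rvalregs = sorted(specs.keys(), key=lambda reg: values[reg], reverse=True)
--     max_count = max(counts.values()) if counts else 0
--     items = []
--     for r in range(max_count):
--         for reg in rvalregs:
--             if counts[reg] > r:
--                 items.append(reg)
--     return items
-- ===== Notes on version B (the rewrite author's own statement) =====
-- stated objective: simpler
-- what changed: Replaces A's dict-of-piece-lists plus pop()-based while/all_appended loop with per-region integer counts and a bounded round-indexed double loop (for r in range(max_count): emit every region whose count exceeds r).
import Mathlib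
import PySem

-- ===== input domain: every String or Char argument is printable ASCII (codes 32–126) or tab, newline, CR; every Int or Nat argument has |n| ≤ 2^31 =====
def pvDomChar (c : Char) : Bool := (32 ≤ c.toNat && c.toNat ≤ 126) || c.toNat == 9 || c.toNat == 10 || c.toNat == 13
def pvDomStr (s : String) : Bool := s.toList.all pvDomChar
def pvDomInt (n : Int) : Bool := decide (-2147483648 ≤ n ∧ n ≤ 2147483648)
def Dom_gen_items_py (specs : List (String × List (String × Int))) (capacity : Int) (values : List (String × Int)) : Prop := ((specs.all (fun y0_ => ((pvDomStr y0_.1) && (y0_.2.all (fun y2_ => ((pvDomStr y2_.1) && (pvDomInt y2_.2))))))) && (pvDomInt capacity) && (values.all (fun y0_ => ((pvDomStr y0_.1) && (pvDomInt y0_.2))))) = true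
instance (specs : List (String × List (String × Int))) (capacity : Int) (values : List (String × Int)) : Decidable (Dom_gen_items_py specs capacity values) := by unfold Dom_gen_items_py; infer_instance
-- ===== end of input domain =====

-- B replaces A's list-popping while/all_appended loop with per-region integer
-- counts and a bounded round-indexed double loop (objective: simpler).

-- ===== PORT A =====
-- one iteration of A's inner 'for reg in rvalregs' body (state: all, items, all_appended)
def pvRoundStep (st : PySem.Dict String (List String) × List String × Bool) (reg : String) :
    PySem.Dict String (List String) × List String × Bool :=
  if (st.1.getD reg []).length > 0 then
    match PySem.List.pop? (st.1.getD reg []) (-1) with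
    | some (x, rest) =>
        (st.1.insert reg rest, st.2.1 ++ [x], if rest.length ≠ 0 then false else st.2.2)
    | none => st
  else st

-- A's 'while not all_appended' loop; fuel is only a totality guard (1 + total
-- number of generated pieces bounds the number of rounds)
def pvLoopA (regs : List String) : Nat → PySem.Dict String (List String) → List String
  | 0, _ => []
  | fuel+1, all =>
    let st := regs.foldl pvRoundStep (all, ([] : List String), true)
    if st.2.2 then st.2.1 else st.2.1 ++ pvLoopA regs fuel st.1

def gen_items_py (specs : List (String × List (String × Int))) (capacity : Int) (values : List (String × Int)) : List String :=
  let sd := PySem.Dict.ofList specs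
  let allD := sd.items.foldl (fun d p =>
      d.insert p.1 ((PySem.List.pyRange (PySem.Int.floordiv capacity ((PySem.Dict.ofList p.2).getD "len" 0)) 0 (-1)).map (fun _ => p.1)))
    PySem.Dict.empty
  let rvalregs := PySem.List.sorted sd.keys (fun reg => (PySem.Dict.ofList values).getD reg 0) true
  pvLoopA rvalregs (allD.values.foldl (fun a l => a + l.length) 0 + 1) allD

-- ===== PORT B =====
def gen_items_py_alt (specs : List (String × List (String × Int))) (capacity : Int) (values : List (String × Int)) : List String :=
  let sd := PySem.Dict.ofList specs
  let counts := sd.items.foldl (fun (d : PySem.Dict String Int) p =>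
      d.insert p.1 (PySem.Int.floordiv capacity ((PySem.Dict.ofList p.2).getD "len" 0))) PySem.Dict.empty
  let rvalregs := PySem.List.sorted sd.keys (fun reg => (PySem.Dict.ofList values).getD reg 0) true
  let max_count : Int :=
    match PySem.List.max? counts.values (fun v => v) with
    | some m => m
    | none => 0
  (PySem.List.pyRange 0 max_count 1).foldl (fun items r =>
      rvalregs.foldl (fun items reg => if r < counts.getD reg 0 then items ++ [reg] else items) items) []

-- ===== PRECONDITION & SPEC =====
-- Pre_ excludes exactly the inputs where Python A raises: a spec without a
-- 'len' key or a region missing from values (KeyError), or 'len' = 0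
-- (ZeroDivisionError).
def Pre_gen_items_py (specs : List (String × List (String × Int))) (capacity : Int) (values : List (String × Int)) : Prop :=
  ∀ p ∈ (PySem.Dict.ofList specs).items,
    ((PySem.Dict.ofList p.2).get? "len" ≠ none ∧ (PySem.Dict.ofList p.2).get? "len" ≠ some 0) ∧
    (PySem.Dict.ofList values).contains p.1 = true
instance (specs : List (String × List (String × Int))) (capacity : Int) (values : List (String × Int)) : Decidable (Pre_gen_items_py specs capacity values) := by unfold Pre_gen_items_py; infer_instance

def pvWitness_gen_items_py : (List (String × List (String × Int))) × Int × (List (String × Int)) :=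
  ([("Bb", [("len", 3)]), ("C", [("len", 5)])], 12, [("Bb", 2), ("C", 1)])

def Spec_gen_items_py (specs : List (String × List (String × Int))) (capacity : Int) (values : List (String × Int)) (out : List String) : Prop := out = gen_items_py_alt specs capacity values
instance (specs : List (String × List (String × Int))) (capacity : Int) (values : List (String × Int)) (out : List String) : Decidable (Spec_gen_items_py specs capacity values out) := by unfold Spec_gen_items_py; infer_instance

-- ===== CLAIM (what is proved, stated in full; the proofs are below) =====
def Claim_equal_gen_items_py : Prop := ∀ (specs : List (String × List (String × Int))) (capacity : Int) (values : List (String × Int)), Dom_gen_items_py specs capacity values → Pre_gen_items_py specs capacity values → Spec_gen_items_py specs capacity values (gen_items_py specs capacity values)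

-- ===== LEMMAS AND PROOFS =====

-- abstract round-indexed emission: round r emits every reg with r < n reg
def pvEmits (regs : List String) (n : String → Nat) (R : Nat) : List String :=
  (List.range R).flatMap (fun r => regs.filter (fun reg => decide (r < n reg)))

-- the maximal per-region count
def pvMx (regs : List String) (n : String → Nat) : Nat :=
  regs.foldl (fun a reg => max a (n reg)) 0

theorem pvMx_ge (regs : List String) (n : String → Nat) :
    ∀ reg ∈ regs, n reg ≤ pvMx regs n :=
  (PySem.List.le_foldl_max_nat regs n 0).2

theorem pvFoldl_max_le (n : String → Nat) (S : Nat) :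
    ∀ (regs : List String) (i : Nat), (∀ reg ∈ regs, n reg ≤ S) → i ≤ S →
      regs.foldl (fun a reg => max a (n reg)) i ≤ S := by
  intro regs
  induction regs with
  | nil => intro i _ hi; simpa using hi
  | cons r t ih =>
    intro i h hi
    simp only [List.foldl_cons]
    exact ih _ (fun reg hm => h reg (List.mem_cons_of_mem _ hm))
      (by have := h r (List.mem_cons_self); omega)

theorem pvMx_le (regs : List String) (n : String → Nat) (S : Nat)
    (h : ∀ reg ∈ regs, n reg ≤ S) : pvMx regs n ≤ S :=
  pvFoldl_max_le n S regs 0 h (Nat.zero_le _)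

theorem pvMx_pred (n : String → Nat) :
    ∀ (regs : List String) (i : Nat),
      regs.foldl (fun a reg => max a (n reg - 1)) (i - 1)
        = regs.foldl (fun a reg => max a (n reg)) i - 1 := by
  intro regs
  induction regs with
  | nil => intro i; simp
  | cons r t ih =>
    intro i
    simp only [List.foldl_cons]
    rw [show max (i - 1) (n r - 1) = max i (n r) - 1 by omega]
    exact ih (max i (n r))

theorem pvRound
    (n : String → Nat) :
    ∀ (regs : List String), regs.Nodup →
    ∀ (all : PySem.Dict String (List String)) (items : List String) (flag : Bool),
    (∀ reg ∈ regs, all.getD reg [] = List.replicate (n reg) reg) →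
    ∃ all',
      regs.foldl pvRoundStep (all, items, flag)
        = (all', items ++ regs.filter (fun reg => decide (0 < n reg)),
            flag && !(regs.any (fun reg => decide (1 < n reg))))
      ∧ (∀ reg ∈ regs, all'.getD reg [] = List.replicate (n reg - 1) reg)
      ∧ (∀ x, x ∉ regs → all'.getD x [] = all.getD x []) := by
  intro regs
  induction regs with
  | nil =>
    intro _ all items flag _
    exact ⟨all, by simp, by simp, fun x _ => rfl⟩
  | cons r t ih =>
    intro hnd all items flag H
    have hr : r ∉ t := (List.nodup_cons.mp hnd).1
    have hnt : t.Nodup := (List.nodup_cons.mp hnd).2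
    have hAr : all.getD r [] = List.replicate (n r) r := H r List.mem_cons_self
    simp only [List.foldl_cons]
    cases hn : n r with
    | zero =>
      have hstep : pvRoundStep (all, items, flag) r = (all, items, flag) := by
        simp [pvRoundStep, hAr, hn]
      rw [hstep]
      obtain ⟨all', heq, h1, h2⟩ :=
        ih hnt all items flag (fun reg hm => H reg (List.mem_cons_of_mem _ hm))
      refine ⟨all', ?_, ?_, ?_⟩
      · rw [heq]; simp [hn]
      · intro reg hm
        rcases List.mem_cons.mp hm with rfl | hm'
        · rw [h2 reg hr, hAr, hn]
        · exact h1 reg hm'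
      · intro x hx
        exact h2 x (fun h => hx (List.mem_cons_of_mem _ h))
    | succ m =>
      have hpop : PySem.List.pop? (List.replicate (m+1) r) (-1)
          = some (r, List.replicate m r) := by
        rw [List.replicate_succ']
        exact PySem.List.pop?_last _ _
      have hstep : pvRoundStep (all, items, flag) r
          = (all.insert r (List.replicate m r), items ++ [r],
              if m ≠ 0 then false else flag) := by
        simp [pvRoundStep, hAr, hn, hpop]
      rw [hstep]
      have H1 : ∀ reg ∈ t,
          (all.insert r (List.replicate m r)).getD reg [] = List.replicate (n reg) reg := by
        intro reg hm
        rw [PySem.Dict.getD_insert_of_ne _ _ _ (by rintro rfl; exact hr hm)]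
        exact H reg (List.mem_cons_of_mem _ hm)
      obtain ⟨all', heq, h1, h2⟩ :=
        ih hnt (all.insert r (List.replicate m r)) (items ++ [r])
          (if m ≠ 0 then false else flag) H1
      refine ⟨all', ?_, ?_, ?_⟩
      · rw [heq]
        have hfilter : (r :: t).filter (fun reg => decide (0 < n reg))
            = r :: t.filter (fun reg => decide (0 < n reg)) := by
          simp [hn]
        rw [hfilter]
        have hx1 : items ++ [r] ++ List.filter (fun reg => decide (0 < n reg)) t
            = items ++ r :: List.filter (fun reg => decide (0 < n reg)) t := by simp
        have hx2 : ((if m ≠ 0 then false else flag) && !t.any fun reg => decide (1 < n reg))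
            = (flag && !(r :: t).any fun reg => decide (1 < n reg)) := by
          cases m with
          | zero => simp [hn]
          | succ k => simp [hn]
        rw [hx1, hx2]
      · intro reg hm
        rcases List.mem_cons.mp hm with rfl | hm'
        · rw [h2 reg hr, PySem.Dict.getD_insert_self, hn, Nat.add_sub_cancel]
        · exact h1 reg hm'
      · intro x hx
        rw [h2 x (fun h => hx (List.mem_cons_of_mem _ h)),
          PySem.Dict.getD_insert_of_ne _ _ _ (by rintro rfl; exact hx List.mem_cons_self)]

theorem pvEmits_succ (regs : List String) (n : String → Nat) (R : Nat) :
    pvEmits regs n (R + 1)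
      = regs.filter (fun reg => decide (0 < n reg))
        ++ pvEmits regs (fun reg => n reg - 1) R := by
  unfold pvEmits
  rw [List.range_succ_eq_map]
  simp only [List.flatMap_cons, List.flatMap_map]
  refine congrArg _ (List.flatMap_congr ?_)
  intro r _
  refine List.filter_congr ?_
  intro reg _
  simp only [decide_eq_decide]
  omega

theorem pvLoop
    (regs : List String) (hnd : regs.Nodup) :
    ∀ (fuel : Nat) (n : String → Nat) (all : PySem.Dict String (List String)),
    (∀ reg ∈ regs, all.getD reg [] = List.replicate (n reg) reg) →
    max 1 (pvMx regs n) ≤ fuel →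
    pvLoopA regs fuel all = pvEmits regs n (pvMx regs n) := by
  intro fuel
  induction fuel with
  | zero => intro n all _ hf; omega
  | succ f ih =>
    intro n all H hf
    obtain ⟨all', heq, h1, _⟩ := pvRound n regs hnd all [] true H
    rw [pvLoopA, heq]
    by_cases hany : (regs.any fun reg => decide (1 < n reg)) = true
    · -- some region still has at least two pieces left: the loop continues
      simp only [hany, Bool.not_true, Bool.and_false]
      have hMx2 : 2 ≤ pvMx regs n := by
        obtain ⟨reg, hm, hlt⟩ := List.any_eq_true.mp hany
        have := pvMx_ge regs n reg hm
        simp only [decide_eq_true_eq] at hlt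
        omega
      have hpred : pvMx regs (fun reg => n reg - 1) = pvMx regs n - 1 := by
        have := pvMx_pred n regs 0
        simpa [pvMx] using this
      rw [ih (fun reg => n reg - 1) all' h1 (by rw [hpred]; omega)]
      rw [show pvMx regs n = (pvMx regs n - 1) + 1 by omega, pvEmits_succ, hpred]
      simp
    · -- every region emitted its last piece (or none): the loop stops
      simp only [Bool.not_eq_true] at hany
      simp only [hany, Bool.not_false, Bool.and_true, if_pos, List.nil_append]
      have hle1 : ∀ reg ∈ regs, n reg ≤ 1 := by
        intro reg hm
        by_contra hgt
        have : regs.any (fun reg => decide (1 < n reg)) = true :=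
          List.any_eq_true.mpr ⟨reg, hm, by simp; omega⟩
        simp [this] at hany
      have hMx1 : pvMx regs n ≤ 1 := pvMx_le regs n 1 hle1
      rcases Nat.le_one_iff_eq_zero_or_eq_one.mp hMx1 with h0 | h1'
      · rw [h0]
        have : regs.filter (fun reg => decide (0 < n reg)) = [] := by
          refine List.filter_eq_nil_iff.mpr ?_
          intro reg hm
          have := pvMx_ge regs n reg hm
          simp only [decide_eq_true_eq] at *
          omega
        rw [this]
        simp [pvEmits]
      · rw [h1']
        simp [pvEmits, List.range_one]

theorem pvPyRange_toNat (m : Int) :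
    PySem.List.pyRange 0 m 1 = (List.range m.toNat).map Nat.cast := by
  by_cases h : m ≤ 0
  · rw [show m.toNat = 0 by omega]
    simp [PySem.List.pyRange]; omega
  · rw [show m = (m.toNat : Int) by omega]
    exact PySem.List.pyRange_zero_natCast m.toNat

theorem pvFoldlMaxInt_toNat :
    ∀ (t : List Int) (v : Int),
      (t.foldl max v).toNat = (t.map Int.toNat).foldl max v.toNat := by
  intro t
  induction t with
  | nil => intro v; simp
  | cons x s ih =>
    intro v
    simp only [List.foldl_cons, List.map_cons]
    rw [ih]
    congr 1
    omega

-- per-item count: capacity // spec['len'] (as A and B both compute it)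
def pvCntP (capacity : Int) (p : String × List (String × Int)) : Int :=
  PySem.Int.floordiv capacity ((PySem.Dict.ofList p.2).getD "len" 0)

-- the count of a region, looked up through the specs dict
def pvCI (specs : List (String × List (String × Int))) (capacity : Int) (reg : String) : Int :=
  pvCntP capacity (reg, (PySem.Dict.ofList specs).getD reg [])

def pvC (specs : List (String × List (String × Int))) (capacity : Int) (reg : String) : Nat :=
  (pvCI specs capacity reg).toNat

-- the regions, reverse-sorted by value (shared by both ports)
def pvRv (specs : List (String × List (String × Int))) (values : List (String × Int)) : List String :=
  PySem.List.sorted (PySem.Dict.ofList specs).keys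
    (fun reg => (PySem.Dict.ofList values).getD reg 0) true

theorem pvBuild_items {ν : Type} (specs : List (String × List (String × Int)))
    (v : String × List (String × Int) → ν) :
    (List.foldl (fun d p => d.insert p.1 (v p)) PySem.Dict.empty (PySem.Dict.ofList specs).items).items
      = (PySem.Dict.ofList specs).items.map (fun p => (p.1, v p)) := by
  have hnd : ((PySem.Dict.ofList specs).items.map (fun p : String × List (String × Int) => p.1)).Nodup := by
    have := PySem.Dict.nodup_keys_ofList specs
    simpa [PySem.Dict.keys] using this
  rw [PySem.Dict.items_foldl_insert_fresh ((PySem.Dict.ofList specs).items) (fun p => p.1) v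
    PySem.Dict.empty (fun a _ => by simp) hnd]
  rfl

theorem pvBuild_keys {ν : Type} (specs : List (String × List (String × Int)))
    (v : String × List (String × Int) → ν) :
    (List.foldl (fun d p => d.insert p.1 (v p)) PySem.Dict.empty (PySem.Dict.ofList specs).items).keys
      = (PySem.Dict.ofList specs).keys := by
  show (List.foldl (fun d p => d.insert p.1 (v p)) PySem.Dict.empty (PySem.Dict.ofList specs).items).items.map (·.1)
      = (PySem.Dict.ofList specs).items.map (·.1)
  rw [pvBuild_items]
  simp

theorem pvBuild_values {ν : Type} (specs : List (String × List (String × Int)))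
    (v : String × List (String × Int) → ν) :
    (List.foldl (fun d p => d.insert p.1 (v p)) PySem.Dict.empty (PySem.Dict.ofList specs).items).values
      = (PySem.Dict.ofList specs).items.map v := by
  show (List.foldl (fun d p => d.insert p.1 (v p)) PySem.Dict.empty (PySem.Dict.ofList specs).items).items.map (·.2)
      = (PySem.Dict.ofList specs).items.map v
  rw [pvBuild_items]
  simp

theorem pvMem_items (specs : List (String × List (String × Int))) (reg : String)
    (h : reg ∈ (PySem.Dict.ofList specs).keys) :
    (reg, (PySem.Dict.ofList specs).getD reg []) ∈ (PySem.Dict.ofList specs).items := by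
  obtain ⟨p, hp, hfst⟩ := List.mem_map.mp h
  have hgd : (PySem.Dict.ofList specs).getD p.1 [] = p.2 := by
    have := PySem.Dict.getD_of_mem_items (PySem.Dict.ofList specs)
      (k := p.1) (v := p.2) (by simpa using hp) (PySem.Dict.nodup_keys_ofList specs) []
    simpa using this
  subst hfst
  rw [hgd]
  simpa using hp

theorem pvBuild_getD {ν : Type} (specs : List (String × List (String × Int)))
    (v : String × List (String × Int) → ν) (d0 : ν) (reg : String)
    (h : reg ∈ (PySem.Dict.ofList specs).keys) :
    (List.foldl (fun d p => d.insert p.1 (v p)) PySem.Dict.empty (PySem.Dict.ofList specs).items).getD reg d0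
      = v (reg, (PySem.Dict.ofList specs).getD reg []) := by
  refine PySem.Dict.getD_of_mem_items _ ?_ ?_ d0
  · rw [pvBuild_items]
    exact List.mem_map.mpr ⟨_, pvMem_items specs reg h, rfl⟩
  · rw [pvBuild_keys]
    exact PySem.Dict.nodup_keys_ofList specs

theorem pvRep (c : Int) (s : String) :
    (PySem.List.pyRange c 0 (-1)).map (fun _ => s) = List.replicate c.toNat s := by
  rw [List.map_const']
  congr 1
  simp [PySem.List.pyRange]; omega

theorem pvMx_perm (l l' : List String) (h : l.Perm l') (n : String → Nat) :
    pvMx l n = pvMx l' n := by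
  unfold pvMx
  rw [← List.foldl_map (f := n) (g := max), ← List.foldl_map (f := n) (g := max)]
  exact (h.map n).foldl_eq 0

theorem pvCI_of_mem (specs : List (String × List (String × Int))) (capacity : Int)
    (p : String × List (String × Int)) (hp : p ∈ (PySem.Dict.ofList specs).items) :
    pvCI specs capacity p.1 = pvCntP capacity p := by
  unfold pvCI
  have hgd : (PySem.Dict.ofList specs).getD p.1 [] = p.2 :=
    PySem.Dict.getD_of_mem_items _ (by simpa using hp) (PySem.Dict.nodup_keys_ofList specs) []
  rw [hgd]

theorem pvA_eq (specs : List (String × List (String × Int))) (capacity : Int) (values : List (String × Int)) :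
    gen_items_py specs capacity values
      = pvEmits (pvRv specs values) (pvC specs capacity)
          (pvMx (pvRv specs values) (pvC specs capacity)) := by
  unfold gen_items_py
  have hnd : (pvRv specs values).Nodup :=
    ((PySem.List.sorted_perm _ _ _).nodup_iff).mpr (PySem.Dict.nodup_keys_ofList specs)
  refine pvLoop (pvRv specs values) hnd _ (pvC specs capacity) _ ?_ ?_
  · intro reg hm
    have hk : reg ∈ (PySem.Dict.ofList specs).keys := by
      have := (PySem.List.mem_sorted (xs := (PySem.Dict.ofList specs).keys)
        (key := fun reg => (PySem.Dict.ofList values).getD reg 0) (rev := true) (x := reg)).mp hm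
      exact this
    rw [pvBuild_getD specs
      (fun p => (PySem.List.pyRange (PySem.Int.floordiv capacity ((PySem.Dict.ofList p.2).getD "len" 0)) 0 (-1)).map (fun _ => p.1))
      [] reg hk]
    rw [pvRep]
    rfl
  · rw [pvBuild_values specs
      (fun p => (PySem.List.pyRange (PySem.Int.floordiv capacity ((PySem.Dict.ofList p.2).getD "len" 0)) 0 (-1)).map (fun _ => p.1))]
    rw [List.foldl_map, PySem.List.foldl_add_nat]
    have hlen : ∀ p : String × List (String × Int),
        ((PySem.List.pyRange (PySem.Int.floordiv capacity ((PySem.Dict.ofList p.2).getD "len" 0)) 0 (-1)).map (fun _ => p.1)).length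
          = (pvCntP capacity p).toNat := by
      intro p
      rw [pvRep]
      simp [pvCntP]
    have hbound : ∀ reg ∈ pvRv specs values,
        pvC specs capacity reg
          ≤ (List.map (fun p => ((PySem.List.pyRange (PySem.Int.floordiv capacity ((PySem.Dict.ofList p.2).getD "len" 0)) 0 (-1)).map (fun _ => p.1)).length) (PySem.Dict.ofList specs).items).sum := by
      intro reg hm
      have hk : reg ∈ (PySem.Dict.ofList specs).keys :=
        (PySem.List.mem_sorted (xs := (PySem.Dict.ofList specs).keys)
          (key := fun reg => (PySem.Dict.ofList values).getD reg 0) (rev := true) (x := reg)).mp hm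
      have hmem := pvMem_items specs reg hk
      refine List.single_le_sum (fun _ _ => Nat.zero_le _) _ ?_
      refine List.mem_map.mpr ⟨_, hmem, ?_⟩
      rw [hlen]
      show (pvCntP capacity (reg, (PySem.Dict.ofList specs).getD reg [])).toNat = pvC specs capacity reg
      rfl
    have := pvMx_le _ _ _ hbound
    omega

-- B's counts dict and its max, as the port computes them
def pvCountsD (specs : List (String × List (String × Int))) (capacity : Int) : PySem.Dict String Int :=
  List.foldl (fun d p => d.insert p.1 (PySem.Int.floordiv capacity ((PySem.Dict.ofList p.2).getD "len" 0)))
    PySem.Dict.empty (PySem.Dict.ofList specs).items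

def pvM (specs : List (String × List (String × Int))) (capacity : Int) : Int :=
  match PySem.List.max? (pvCountsD specs capacity).values (fun v => v) with
  | some m => m
  | none => 0

theorem pvMaxVal (specs : List (String × List (String × Int))) (capacity : Int) :
    (pvM specs capacity).toNat = pvMx (PySem.Dict.ofList specs).keys (pvC specs capacity) := by
  have hvals : (pvCountsD specs capacity).values
      = (PySem.Dict.ofList specs).items.map
          (fun p => PySem.Int.floordiv capacity ((PySem.Dict.ofList p.2).getD "len" 0)) :=
    pvBuild_values specs _
  have hkm : (PySem.Dict.ofList specs).keys.map (pvC specs capacity)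
      = ((PySem.Dict.ofList specs).items.map
          (fun p => PySem.Int.floordiv capacity ((PySem.Dict.ofList p.2).getD "len" 0))).map Int.toNat := by
    show ((PySem.Dict.ofList specs).items.map (fun p => p.1)).map (pvC specs capacity) = _
    rw [List.map_map, List.map_map]
    refine List.map_congr_left ?_
    intro p hp
    show pvC specs capacity p.1
        = (PySem.Int.floordiv capacity ((PySem.Dict.ofList p.2).getD "len" 0)).toNat
    unfold pvC
    rw [pvCI_of_mem specs capacity p hp]
    rfl
  have hMx : pvMx (PySem.Dict.ofList specs).keys (pvC specs capacity)
      = (((PySem.Dict.ofList specs).items.map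
          (fun p => PySem.Int.floordiv capacity ((PySem.Dict.ofList p.2).getD "len" 0))).map Int.toNat).foldl max 0 := by
    unfold pvMx
    rw [← List.foldl_map, hkm]
  rw [hMx]
  unfold pvM
  rw [hvals]
  cases hL : (PySem.Dict.ofList specs).items.map
      (fun p => PySem.Int.floordiv capacity ((PySem.Dict.ofList p.2).getD "len" 0)) with
  | nil =>
    have hnone : PySem.List.max? ([] : List Int) (fun v => v) = none := rfl
    simp [hnone]
  | cons v t =>
    rw [PySem.List.max?_id_cons]
    show (t.foldl max v).toNat = ((v :: t).map Int.toNat).foldl max 0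
    rw [pvFoldlMaxInt_toNat]
    simp

theorem pvOuter (rv : List String) (q : String → Int) (R : Nat) (n : String → Nat)
    (h : ∀ reg ∈ rv, ∀ r : Nat, ((r : Int) < q reg ↔ r < n reg)) :
    (List.range R).foldl (fun items rn =>
        rv.foldl (fun items reg => if ((rn : Nat) : Int) < q reg then items ++ [reg] else items) items) []
      = pvEmits rv n R := by
  calc (List.range R).foldl (fun items rn =>
        rv.foldl (fun items reg => if ((rn : Nat) : Int) < q reg then items ++ [reg] else items) items) []
      = (List.range R).foldl (fun acc rn => acc ++ rv.filter (fun reg => decide (rn < n reg))) [] := by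
        refine PySem.List.foldl_congr_mem _ _ _ _ ?_
        intro acc rn _
        rw [PySem.List.foldl_append_ite_eq_filter (p := fun reg => ((rn : Nat) : Int) < q reg)]
        refine congrArg _ (List.filter_congr ?_)
        intro reg hm
        simp only [decide_eq_decide]
        exact h reg hm rn
    _ = [] ++ (List.range R).flatMap (fun rn => rv.filter (fun reg => decide (rn < n reg))) :=
        PySem.List.foldl_append_eq_flatMap _ _ _
    _ = pvEmits rv n R := by simp [pvEmits]

theorem pvB_eq (specs : List (String × List (String × Int))) (capacity : Int) (values : List (String × Int)) :
    gen_items_py_alt specs capacity values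
      = pvEmits (pvRv specs values) (pvC specs capacity)
          (pvMx (pvRv specs values) (pvC specs capacity)) := by
  have hq : ∀ reg ∈ pvRv specs values, ∀ r : Nat,
      ((r : Int) < (pvCountsD specs capacity).getD reg 0 ↔ r < pvC specs capacity reg) := by
    intro reg hm r
    have hk : reg ∈ (PySem.Dict.ofList specs).keys :=
      (PySem.List.mem_sorted (xs := (PySem.Dict.ofList specs).keys)
        (key := fun reg => (PySem.Dict.ofList values).getD reg 0) (rev := true) (x := reg)).mp hm
    have hgd : (pvCountsD specs capacity).getD reg 0 = pvCI specs capacity reg :=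
      pvBuild_getD specs
        (fun p => PySem.Int.floordiv capacity ((PySem.Dict.ofList p.2).getD "len" 0)) 0 reg hk
    rw [hgd]
    exact Int.lt_toNat.symm
  have hR : (pvM specs capacity).toNat = pvMx (pvRv specs values) (pvC specs capacity) := by
    rw [pvMaxVal]
    exact (pvMx_perm _ _ (PySem.List.sorted_perm _ _ _) _).symm
  calc gen_items_py_alt specs capacity values
      = (PySem.List.pyRange 0 (pvM specs capacity) 1).foldl (fun items r =>
          (pvRv specs values).foldl
            (fun items reg => if r < (pvCountsD specs capacity).getD reg 0 then items ++ [reg] else items) items) [] := rfl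
    _ = ((List.range (pvM specs capacity).toNat).map Nat.cast).foldl (fun items r =>
          (pvRv specs values).foldl
            (fun items reg => if r < (pvCountsD specs capacity).getD reg 0 then items ++ [reg] else items) items) [] := by
        rw [pvPyRange_toNat]
    _ = (List.range (pvM specs capacity).toNat).foldl (fun items rn =>
          (pvRv specs values).foldl
            (fun items reg => if ((rn : Nat) : Int) < (pvCountsD specs capacity).getD reg 0 then items ++ [reg] else items) items) [] :=
        List.foldl_map
    _ = pvEmits (pvRv specs values) (pvC specs capacity) (pvM specs capacity).toNat :=
        pvOuter (pvRv specs values) (fun reg => (pvCountsD specs capacity).getD reg 0)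
          (pvM specs capacity).toNat (pvC specs capacity) hq
    _ = pvEmits (pvRv specs values) (pvC specs capacity)
          (pvMx (pvRv specs values) (pvC specs capacity)) := by rw [hR]

-- ===== VERDICT (by name: the statement is the Claim_ definition above) =====
theorem gen_items_py_spec : Claim_equal_gen_items_py := by
  intro specs capacity values _ _
  unfold Spec_gen_items_py
  rw [pvA_eq, pvB_eq]
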